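-- pv_equiv track=rewrite | github.com/denys-duchier/Scolar | scolars.py | format_telephone
-- ===== SOURCE A (Python) =====
-- def format_telephone(n):
--     if n is None:
--         return ''
--     if len(n) < 7:
--         return n
--     else:
--         n = n.replace(' ','').replace('.','')
--         i = 0
--         r = ''
--         j = len(n) - 1
--         while j >= 0:
--             r = n[j] + r
--             if i % 2 == 1 and j != 0:
--                 r = ' ' + r
--             i += 1
--             j -= 1
--         if len(r) == 13 and r[0] != '0':
--             r = '0' + r
--         return r
-- ===== SOURCE B (Python) =====
-- def format_telephone(n):
--     if n is None:
--         return ''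
--     if len(n) < 7:
--         return n
--     s = n.replace(' ', '').replace('.', '')
--     # a space goes before position k exactly when k > 0 and (len(s) - k) is even
--     r = ''.join((' ' if k > 0 and (len(s) - k) % 2 == 0 else '') + c
--                 for k, c in enumerate(s))
--     if len(r) == 13 and r[0] != '0':
--         r = '0' + r
--     return r
-- ===== Notes on version B (the rewrite author's own statement) =====
-- stated objective: simpler
-- what changed: Replaces A's right-to-left while loop with a descending index and a parity counter by a single left-to-right join over enumerate(s) using the closed-form test 'space before position k iff k > 0 and (len(s)-k) is even'.
import Mathlib
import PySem

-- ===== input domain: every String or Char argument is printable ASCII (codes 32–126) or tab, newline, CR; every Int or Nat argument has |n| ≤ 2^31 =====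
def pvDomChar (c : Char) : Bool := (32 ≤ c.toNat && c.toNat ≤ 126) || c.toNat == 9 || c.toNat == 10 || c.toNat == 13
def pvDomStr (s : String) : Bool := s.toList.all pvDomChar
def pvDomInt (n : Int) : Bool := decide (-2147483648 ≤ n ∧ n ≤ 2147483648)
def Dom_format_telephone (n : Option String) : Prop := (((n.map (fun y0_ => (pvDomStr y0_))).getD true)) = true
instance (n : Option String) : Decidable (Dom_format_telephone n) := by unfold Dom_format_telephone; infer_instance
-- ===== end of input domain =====

-- B replaces A's right-to-left while loop (descending index, parity counter) by one
-- left-to-right join over enumerate(s) with a closed-form space-position test (objective: simpler).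

-- ===== PORT A =====
-- both Pythons share these two lines verbatim, so both ports use these helpers:
-- n.replace(' ','').replace('.','')
def pvClean (str : String) : List Char :=
  PySem.Chars.replace (PySem.Chars.replace str.toList [' '] []) ['.'] []
-- if len(r) == 13 and r[0] != '0': r = '0' + r
def pvFix (r : List Char) : List Char :=
  if r.length == 13 && ((PySem.List.pyGet? r 0).getD ' ' != '0') then '0' :: r else r

-- Python's 'while j >= 0' with j descending from len(n)-1; j is a Nat here and the
-- 'j >= 0' exit is the match on 0 (the body runs for every j down to and including 0).
def pvLoopA (s : List Char) : Nat → Nat → List Char → List Char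
  | j, i, r =>
    let r1 := (PySem.List.pyGetD s (j : Int) ' ') :: r      -- n[j] (always in range here)
    let r2 := if i % 2 == 1 && j != 0 then ' ' :: r1 else r1
    match j with
    | 0 => r2
    | Nat.succ j' => pvLoopA s j' (i + 1) r2

-- if s is empty, Python's j starts at -1 and the while loop never runs
def pvCoreA (s : List Char) : List Char :=
  if s.isEmpty then [] else pvLoopA s (s.length - 1) 0 []

def format_telephone (n : Option String) : String :=
  match n with
  | none => ""
  | some str =>
    if str.toList.length < 7 then str
    else String.ofList (pvFix (pvCoreA (pvClean str)))

-- ===== PORT B =====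
-- ''.join((' ' if k > 0 and (len(s) - k) % 2 == 0 else '') + c for k, c in enumerate(s))
def pvCoreB (s : List Char) : List Char :=
  PySem.Chars.join []
    ((PySem.List.enumerate s 0).map (fun kc =>
      (if 0 < kc.1 && PySem.Int.mod ((s.length : Int) - kc.1) 2 == 0 then [' '] else []) ++ [kc.2]))

def format_telephone_alt (n : Option String) : String :=
  match n with
  | none => ""
  | some str =>
    if str.toList.length < 7 then str
    else String.ofList (pvFix (pvCoreB (pvClean str)))

-- ===== PRECONDITION & SPEC =====
def Spec_format_telephone (n : Option String) (out : String) : Prop := out = format_telephone_alt n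
instance (n : Option String) (out : String) : Decidable (Spec_format_telephone n out) := by unfold Spec_format_telephone; infer_instance

-- ===== CLAIM (what is proved, stated in full; the proofs are below) =====
def Claim_equal_format_telephone : Prop := ∀ (n : Option String), Dom_format_telephone n → Spec_format_telephone n (format_telephone n)

-- ===== LEMMAS AND PROOFS =====

-- the contribution of position k to the output (space iff k > 0 and len-k even), Nat form
def pvPiece (s : List Char) (k : Nat) : List Char :=
  (if 0 < k ∧ (s.length - k) % 2 = 0 then [' '] else []) ++ [s.getD k ' ']

theorem pvLoopA_eq (s : List Char) (j i : Nat) (r : List Char)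
    (hj : j < s.length) (hi : i = s.length - 1 - j) :
    pvLoopA s j i r = (List.range (j + 1)).flatMap (pvPiece s) ++ r := by
  induction j generalizing i r with
  | zero =>
    simp only [pvLoopA]
    have hc : (i % 2 == 1 && (0 : Nat) != 0) = false := by simp
    rw [hc]
    show PySem.List.pyGetD s ((0 : Nat) : Int) ' ' :: r = pvPiece s 0 ++ r
    rw [PySem.List.pyGetD_natCast]
    simp [pvPiece, List.getD]
  | succ j ih =>
    have hcond : (i % 2 == 1 && (j + 1 : Nat) != 0) =
        decide (0 < j + 1 ∧ (s.length - (j + 1)) % 2 = 0) := by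
      have h1 : i % 2 = 1 ↔ (s.length - (j + 1)) % 2 = 0 := by omega
      by_cases h : (s.length - (j + 1)) % 2 = 0
      · simp [h, h1.mpr h]
      · have : i % 2 ≠ 1 := fun hc => h (h1.mp hc)
        simp [h, this]
    simp only [pvLoopA]
    rw [hcond]
    have step : (if decide (0 < j + 1 ∧ (s.length - (j + 1)) % 2 = 0) = true
        then ' ' :: (PySem.List.pyGetD s ((j + 1 : Nat) : Int) ' ') :: r
        else (PySem.List.pyGetD s ((j + 1 : Nat) : Int) ' ') :: r) = pvPiece s (j + 1) ++ r := by
      unfold pvPiece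
      rw [PySem.List.pyGetD_natCast]
      split_ifs with h h' h' <;> simp_all
    rw [step, ih (i + 1) _ (by omega) (by omega)]
    rw [List.range_succ (n := j + 1)]
    simp [List.flatMap_append]
-- ''.join(parts) is concatenation of the parts
theorem pvJoin_nil (ps : List (List Char)) : PySem.Chars.join [] ps = ps.flatten := by
  induction ps with
  | nil => rw [PySem.Chars.join_nil]; rfl
  | cons p ps ihp =>
    cases ps with
    | nil => rw [PySem.Chars.join_singleton]; simp
    | cons q qs =>
      rw [PySem.Chars.join_cons_cons, ihp]
      simp

theorem pvCore_eq (s : List Char) : pvCoreA s = pvCoreB s := by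
  unfold pvCoreA pvCoreB
  by_cases hs : s = []
  · subst hs; simp [PySem.List.enumerate]
  · have hlen : 0 < s.length := List.length_pos_iff.mpr hs
    rw [if_neg (by simpa using hs)]
    rw [pvLoopA_eq s (s.length - 1) 0 [] (by omega) (by omega)]
    rw [PySem.List.enumerate_eq_map_pyRange (d := ' ')]
    have hr : PySem.List.pyRange 0 (PySem.List.len s) 1 =
        (List.range s.length).map (fun k : Nat => (k : Int)) := by
      rw [PySem.List.pyRange_one]
      simp [PySem.List.len]
    rw [hr, pvJoin_nil]
    have hone : ∀ k : Nat, k < s.length →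
        ((if 0 < ((k : Nat) : Int) && PySem.Int.mod ((s.length : Int) - ((k : Nat) : Int)) 2 == 0
          then [' '] else []) ++ [PySem.List.pyGetD s ((k : Nat) : Int) ' ']) = pvPiece s k := by
      intro k hk
      have hcast : ((s.length : Int) - (k : Int)) = ((s.length - k : Nat) : Int) := by omega
      have hm : PySem.Int.mod ((s.length - k : Nat) : Int) 2 = (((s.length - k) % 2 : Nat) : Int) := by
        exact_mod_cast PySem.Int.mod_natCast (s.length - k) 2
      have hb : (0 < ((k : Nat) : Int) && PySem.Int.mod ((s.length : Int) - ((k : Nat) : Int)) 2 == 0) =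
          decide (0 < k ∧ (s.length - k) % 2 = 0) := by
        rw [hcast, hm]
        by_cases h0 : 0 < k <;> by_cases h2 : (s.length - k) % 2 = 0 <;>
          simp [h0, h2] <;> omega
      rw [hb, PySem.List.pyGetD_natCast]
      simp only [pvPiece, List.getD]
      by_cases h : 0 < k ∧ (s.length - k) % 2 = 0 <;> simp [h]
    have hmap : ∀ (l : List Nat), (∀ k ∈ l, k < s.length) →
        (((l.map (fun k : Nat => (k : Int))).map
            (fun j => (j, PySem.List.pyGetD s j ' '))).map (fun kc =>
          (if 0 < kc.1 && PySem.Int.mod ((s.length : Int) - kc.1) 2 == 0 then [' '] else []) ++ [kc.2])) =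
        l.map (pvPiece s) := by
      intro l hl
      induction l with
      | nil => rfl
      | cons k l ihl =>
        simp only [List.map_cons, List.cons.injEq]
        exact ⟨hone k (hl k (by simp)), ihl (fun x hx => hl x (by simp [hx]))⟩
    rw [hmap (List.range s.length) (fun k hk => List.mem_range.mp hk)]
    have hn1 : s.length - 1 + 1 = s.length := by omega
    rw [hn1, List.append_nil]
    rfl

-- ===== VERDICT (by name: the statement is the Claim_ definition above) =====
theorem format_telephone_spec : Claim_equal_format_telephone := by
  intro n _
  unfold Spec_format_telephone format_telephone format_telephone_alt
  match n with
  | none => rfl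
  | some str =>
    show (if str.toList.length < 7 then str else String.ofList (pvFix (pvCoreA (pvClean str)))) =
         (if str.toList.length < 7 then str else String.ofList (pvFix (pvCoreB (pvClean str))))
    by_cases h7 : str.toList.length < 7
    · rw [if_pos h7, if_pos h7]
    · rw [if_neg h7, if_neg h7, pvCore_eq]
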